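-- pv_equiv track=rewrite | github.com/SungHuiChai/skillsense-backend | app/services/confidence_calculator.py | merge_skill_sources
-- ===== SOURCE A (Python) =====
-- from typing import Dict, List, Optional, Set
--
-- def merge_skill_sources(
--
--     cv_skills: List[str],
--     github_skills: List[str],
--     web_skills: List[str],
--     stackoverflow_skills: List[str],
--     blog_skills: Optional[List[str]] = None
-- ) -> Dict[str, Dict[str, bool]]:
--     """
--     Merge skills from multiple sources and track which sources confirmed each skill.
--
--     Args:
--         cv_skills: Skills from CV
--         github_skills: Skills from GitHub
--         web_skills: Skills from web mentions
--         stackoverflow_skills: Skills from Stack Overflow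
--         blog_skills: Skills from personal blog
--
--     Returns:
--         Dict mapping skill names to source presence
--     """
--     all_skills = set()
--     all_skills.update(cv_skills or [])
--     all_skills.update(github_skills or [])
--     all_skills.update(web_skills or [])
--     all_skills.update(stackoverflow_skills or [])
--     if blog_skills:
--         all_skills.update(blog_skills)
--
--     skill_sources = {}
--
--     for skill in all_skills:
--         skill_sources[skill] = {
--             "cv": skill in (cv_skills or []),
--             "github": skill in (github_skills or []),
--             "web_mentions": skill in (web_skills or []),
--             "stackoverflow": skill in (stackoverflow_skills or []),
--             "blog": skill in (blog_skills or []) if blog_skills else False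
--         }
--
--     return skill_sources
-- ===== SOURCE B (Python) =====
-- def merge_skill_sources(
--     cv_skills,
--     github_skills,
--     web_skills,
--     stackoverflow_skills,
--     blog_skills=None,
-- ):
--     sources = [
--         ("cv", cv_skills or []),
--         ("github", github_skills or []),
--         ("web_mentions", web_skills or []),
--         ("stackoverflow", stackoverflow_skills or []),
--         ("blog", blog_skills or []),
--     ]
--     result = {}
--     for name, skills in sources:
--         for skill in skills:
--             rec = result.get(skill)
--             if rec is None:
--                 rec = {n: False for n, _ in sources}
--                 result[skill] = rec
--             rec[name] = True
--     return result
-- ===== Notes on version B (the rewrite author's own statement) =====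
-- stated objective: faster
-- what changed: B replaces A's gather pass (build the union set, then for every skill rescan all five source lists for membership) with one scatter pass over sources x skills that writes each source's flag into a per-skill record as it is seen, so no list-membership scan remains.
import Mathlib
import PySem

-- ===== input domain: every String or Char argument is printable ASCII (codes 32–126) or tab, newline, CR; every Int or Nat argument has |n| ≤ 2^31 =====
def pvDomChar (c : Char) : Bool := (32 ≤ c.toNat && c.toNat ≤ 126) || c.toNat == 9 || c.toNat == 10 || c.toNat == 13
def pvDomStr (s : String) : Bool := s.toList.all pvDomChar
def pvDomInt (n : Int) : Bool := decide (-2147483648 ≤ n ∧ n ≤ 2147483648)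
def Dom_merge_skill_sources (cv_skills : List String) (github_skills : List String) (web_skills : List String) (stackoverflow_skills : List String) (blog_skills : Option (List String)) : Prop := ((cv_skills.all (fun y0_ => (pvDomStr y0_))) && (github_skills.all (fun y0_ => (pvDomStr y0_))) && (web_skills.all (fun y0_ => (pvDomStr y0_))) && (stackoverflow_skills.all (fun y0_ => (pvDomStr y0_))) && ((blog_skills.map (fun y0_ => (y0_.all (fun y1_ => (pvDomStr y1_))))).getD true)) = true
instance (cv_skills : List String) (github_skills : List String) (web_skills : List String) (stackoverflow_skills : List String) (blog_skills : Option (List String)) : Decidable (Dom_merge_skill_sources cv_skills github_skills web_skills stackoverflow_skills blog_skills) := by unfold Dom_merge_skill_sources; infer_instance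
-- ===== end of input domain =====

-- B replaces A's gather pass (build the union set, then rescan every source list per skill)
-- with one scatter pass over sources × skills that writes flags into per-skill records.
-- Python note: A's top-level dict is in set-iteration order; dicts are compared as maps
-- (both ports use first-occurrence order).

-- ===== PORT A =====
-- "blog": skill in (blog_skills or []) if blog_skills else False
def pvBlogFlag (blog_skills : Option (List String)) (skill : String) : Bool :=
  match blog_skills with
  | none => false
  | some bs => if bs.isEmpty then false else bs.contains skill

-- the record A builds for one skill
def pvRecA (cv gh web so : List String) (blog : Option (List String)) (skill : String) :
    List (String × Bool) :=
  [("cv", cv.contains skill), ("github", gh.contains skill),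
   ("web_mentions", web.contains skill), ("stackoverflow", so.contains skill),
   ("blog", pvBlogFlag blog skill)]

def merge_skill_sources (cv_skills : List String) (github_skills : List String) (web_skills : List String) (stackoverflow_skills : List String) (blog_skills : Option (List String)) : List (String × List (String × Bool)) :=
  let all_skills : PySem.Set String :=
    PySem.Set.update (PySem.Set.update (PySem.Set.update (PySem.Set.update PySem.Set.empty
      cv_skills) github_skills) web_skills) stackoverflow_skills
  let all_skills : PySem.Set String :=
    match blog_skills with
    | none => all_skills
    | some bs => if bs.isEmpty then all_skills else PySem.Set.update all_skills bs
  let skill_sources : PySem.Dict String (List (String × Bool)) :=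
    all_skills.foldl (fun d skill =>
      d.insert skill (pvRecA cv_skills github_skills web_skills stackoverflow_skills blog_skills skill))
      PySem.Dict.empty
  skill_sources.items

-- ===== PORT B =====
-- rec[name] = True  (the record's keys are the five source names, all present)
def pvSetFlag (rec : List (String × Bool)) (name : String) : List (String × Bool) :=
  rec.map (fun p => if p.1 == name then (p.1, true) else p)

-- for skill in skills: rec = result.get(skill); if rec is None: result[skill] = blank; rec[name] = True
def pvScatter (blank : List (String × Bool)) (name : String) (skills : List String)
    (d : PySem.Dict String (List (String × Bool))) : PySem.Dict String (List (String × Bool)) :=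
  skills.foldl (fun d skill =>
    (if d.contains skill then d else d.insert skill blank).modify skill blank
      (fun rec => pvSetFlag rec name)) d

def merge_skill_sources_alt (cv_skills : List String) (github_skills : List String) (web_skills : List String) (stackoverflow_skills : List String) (blog_skills : Option (List String)) : List (String × List (String × Bool)) :=
  let sources : List (String × List String) :=
    [("cv", cv_skills), ("github", github_skills), ("web_mentions", web_skills),
     ("stackoverflow", stackoverflow_skills), ("blog", blog_skills.getD [])]
  let blank : List (String × Bool) := sources.map (fun p => (p.1, false))
  (sources.foldl (fun d p => pvScatter blank p.1 p.2 d) PySem.Dict.empty).items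

-- ===== PRECONDITION & SPEC =====
def Spec_merge_skill_sources (cv_skills : List String) (github_skills : List String) (web_skills : List String) (stackoverflow_skills : List String) (blog_skills : Option (List String)) (out : List (String × List (String × Bool))) : Prop := out = merge_skill_sources_alt cv_skills github_skills web_skills stackoverflow_skills blog_skills
instance (cv_skills : List String) (github_skills : List String) (web_skills : List String) (stackoverflow_skills : List String) (blog_skills : Option (List String)) (out : List (String × List (String × Bool))) : Decidable (Spec_merge_skill_sources cv_skills github_skills web_skills stackoverflow_skills blog_skills out) := by unfold Spec_merge_skill_sources; infer_instance

-- ===== CLAIM (what is proved, stated in full; the proofs are below) =====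
def Claim_equal_merge_skill_sources : Prop := ∀ (cv_skills : List String) (github_skills : List String) (web_skills : List String) (stackoverflow_skills : List String) (blog_skills : Option (List String)), Dom_merge_skill_sources cv_skills github_skills web_skills stackoverflow_skills blog_skills → Spec_merge_skill_sources cv_skills github_skills web_skills stackoverflow_skills blog_skills (merge_skill_sources cv_skills github_skills web_skills stackoverflow_skills blog_skills)

-- ===== LEMMAS AND PROOFS =====

-- the (name, skill) event stream of B's double loop
def pvE (cv gh web so blogL : List String) : List (String × String) :=
  [("cv", cv), ("github", gh), ("web_mentions", web),
   ("stackoverflow", so), ("blog", blogL)].flatMap (fun p => p.2.map (fun s => (p.1, s)))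

def pvBlank : List (String × Bool) :=
  [("cv", false), ("github", false), ("web_mentions", false),
   ("stackoverflow", false), ("blog", false)]

-- B's get-or-create step collapses: creating the blank record first changes nothing.
theorem pv_step_collapse (blank : List (String × Bool)) (nm : String)
    (d : PySem.Dict String (List (String × Bool))) (s : String) :
    (if d.contains s then d else d.insert s blank).modify s blank (fun rec => pvSetFlag rec nm)
      = d.modify s blank (fun rec => pvSetFlag rec nm) := by
  by_cases h : d.contains s
  · simp [h]
  · simp only [h, Bool.false_eq_true, if_false]
    have hget : d.get? s = none := by
      simp only [PySem.Dict.get?, Option.map_eq_none_iff, List.find?_eq_none]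
      exact fun p hp hb => h (List.any_eq_true.mpr ⟨p, hp, hb⟩)
    simp only [PySem.Dict.modify, PySem.Dict.getD, PySem.Dict.get?_insert_self,
      PySem.Dict.insert_insert_self, Option.getD_some, hget, Option.getD_none]

-- The double loop over sources is a single fold over (name, skill) events.
theorem pv_scatter_foldl (sources : List (String × List String)) (blank : List (String × Bool))
    (d : PySem.Dict String (List (String × Bool))) :
    sources.foldl (fun d p => pvScatter blank p.1 p.2 d) d
      = (sources.flatMap (fun p => p.2.map (fun s => (p.1, s)))).foldl
          (fun d q => d.modify q.2 blank (fun rec => pvSetFlag rec q.1)) d := by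
  induction sources generalizing d with
  | nil => rfl
  | cons p rest ih =>
    simp only [List.foldl_cons, List.flatMap_cons, List.foldl_append]
    rw [ih]
    congr 1
    unfold pvScatter
    rw [List.foldl_map]
    exact PySem.List.foldl_congr_mem _ _ _ _ (fun acc x _ => pv_step_collapse blank p.1 acc x)

-- Value of the event fold at a key: the flags of the matching events, applied to the start value.
theorem pv_getD_event_fold (E : List (String × String)) (blank : List (String × Bool))
    (d : PySem.Dict String (List (String × Bool))) (s : String) :
    (E.foldl (fun d q => d.modify q.2 blank (fun rec => pvSetFlag rec q.1)) d).getD s blank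
      = ((E.filter (fun q => q.2 == s)).map (fun q => q.1)).foldl pvSetFlag (d.getD s blank) := by
  induction E generalizing d with
  | nil => rfl
  | cons q rest ih =>
    simp only [List.foldl_cons, List.filter_cons]
    by_cases hq : q.2 = s
    · subst hq
      simp only [BEq.rfl, if_true, List.map_cons, List.foldl_cons]
      rw [ih, PySem.Dict.getD_modify_self]
    · have hb : (q.2 == s) = false := by simpa using hq
      simp only [hb, Bool.false_eq_true, if_false]
      rw [ih]
      congr 1
      simp only [PySem.Dict.getD, PySem.Dict.modify]
      rw [PySem.Dict.get?_insert_of_ne _ _ (fun h => hq h.symm)]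

-- Applying a list of flag-writes to a record sets exactly the named entries.
theorem pv_foldl_setFlag (L : List String) (rec : List (String × Bool)) :
    L.foldl pvSetFlag rec = rec.map (fun p => (p.1, p.2 || L.contains p.1)) := by
  induction L generalizing rec with
  | nil => simp
  | cons n rest ih =>
    simp only [List.foldl_cons, ih, pvSetFlag, List.map_map]
    apply List.map_congr_left
    intro p _
    by_cases h : p.1 = n <;> simp [h, Function.comp]

-- a source named n contributes n to skill s's flag-writes iff s is in its list
theorem pv_contains_source (n m s : String) (l : List String) :
    (((l.map (fun s' => (n, s'))).filter (fun q => q.2 == s)).map (fun q => q.1)).contains m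
      = ((n == m) && l.contains s) := by
  have hcoll : ((l.map (fun s' => (n, s'))).filter (fun q => q.2 == s)).map (fun q => q.1)
      = (l.filter (fun a => a == s)).map (fun _ => n) := by
    rw [List.filter_map, List.map_map]; rfl
  rw [hcoll, List.contains_eq_mem, List.contains_eq_mem]
  by_cases h : n = m
  · subst h
    simp only [BEq.rfl, Bool.true_and]
    rw [decide_eq_decide]
    constructor
    · intro hm
      obtain ⟨a, ha, -⟩ := List.mem_map.mp hm
      have hf := List.mem_filter.mp ha
      exact (beq_iff_eq.mp hf.2) ▸ hf.1
    · intro hs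
      exact List.mem_map.mpr ⟨s, List.mem_filter.mpr ⟨hs, beq_iff_eq.mpr rfl⟩, rfl⟩
  · have hb : (n == m) = false := by simpa using h
    simp only [hb, Bool.false_and]
    apply decide_eq_false
    intro hm
    obtain ⟨a, -, he⟩ := List.mem_map.mp hm
    exact h he

-- A's union-set chain is set(cv + gh + web + so + blogL)
theorem pv_chain_eq (cv gh web so bl : List String) :
    PySem.Set.update (PySem.Set.update (PySem.Set.update (PySem.Set.update
      (PySem.Set.update PySem.Set.empty cv) gh) web) so) bl
      = PySem.Set.ofList (cv ++ (gh ++ (web ++ (so ++ bl)))) := by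
  simp only [PySem.Set.ofList, PySem.Set.update, PySem.Set.empty, List.foldl_append]

theorem pv_chain_eq_nil (cv gh web so : List String) :
    PySem.Set.update (PySem.Set.update (PySem.Set.update (PySem.Set.update
      PySem.Set.empty cv) gh) web) so
      = PySem.Set.ofList (cv ++ (gh ++ (web ++ (so ++ [])))) := by
  have h := pv_chain_eq cv gh web so []
  simpa [PySem.Set.update] using h

-- A's items list
theorem pv_A_items (cv gh web so : List String) (blog : Option (List String)) :
    merge_skill_sources cv gh web so blog
      = (PySem.Set.ofList (cv ++ (gh ++ (web ++ (so ++ blog.getD []))))).map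
          (fun s => (s, pvRecA cv gh web so blog s)) := by
  have key : ∀ (U : PySem.Set String), U.Nodup →
      (U.foldl (fun d skill => d.insert skill (pvRecA cv gh web so blog skill))
        (PySem.Dict.empty : PySem.Dict String (List (String × Bool)))).items
      = U.map (fun s => (s, pvRecA cv gh web so blog s)) := by
    intro U hU
    rw [PySem.Dict.items_foldl_insert_fresh U (fun a => a) _ PySem.Dict.empty
      (fun a _ => rfl) (by simpa using hU)]
    rfl
  cases blog with
  | none =>
    simp only [merge_skill_sources, Option.getD_none]
    rw [pv_chain_eq_nil, List.append_nil]
    exact key _ (PySem.Set.nodup_ofList _)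
  | some bs =>
    simp only [merge_skill_sources, Option.getD_some]
    by_cases hbs : bs.isEmpty
    · have hnil : bs = [] := by simpa using hbs
      subst hnil
      simp only [List.isEmpty_nil, if_true]
      rw [pv_chain_eq_nil]
      exact key _ (PySem.Set.nodup_ofList _)
    · simp only [hbs, Bool.false_eq_true, if_false]
      rw [pv_chain_eq]
      exact key _ (PySem.Set.nodup_ofList _)

-- blog membership: A's conditional expression equals membership in (blog or [])
theorem pv_blog_flag (blog : Option (List String)) (s : String) :
    (blog.getD []).contains s = pvBlogFlag blog s := by
  cases blog with
  | none => rfl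
  | some bs =>
    by_cases hbs : bs.isEmpty
    · have hnil : bs = [] := by simpa using hbs
      subst hnil; rfl
    · simp [pvBlogFlag, hbs]

theorem merge_skill_sources_eq (cv gh web so : List String) (blog : Option (List String)) :
    merge_skill_sources cv gh web so blog = merge_skill_sources_alt cv gh web so blog := by
  have hBfold : merge_skill_sources_alt cv gh web so blog
      = ((pvE cv gh web so (blog.getD [])).foldl
          (fun d q => d.modify q.2 pvBlank (fun rec => pvSetFlag rec q.1))
          PySem.Dict.empty).items := by
    simp only [merge_skill_sources_alt, List.map_cons, List.map_nil]
    rw [pv_scatter_foldl]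
    rfl
  have hkeys : ((pvE cv gh web so (blog.getD [])).foldl
        (fun d q => d.modify q.2 pvBlank (fun rec => pvSetFlag rec q.1))
        PySem.Dict.empty).keys
      = PySem.Set.ofList (cv ++ (gh ++ (web ++ (so ++ blog.getD [])))) := by
    rw [PySem.Dict.keys_foldl_modify_key (pvE cv gh web so (blog.getD [])) (fun q => q.2) pvBlank
      (fun _ q => fun rec => pvSetFlag rec q.1) PySem.Dict.empty]
    have hE2 : (pvE cv gh web so (blog.getD [])).map (fun q => q.2)
        = cv ++ (gh ++ (web ++ (so ++ blog.getD []))) := by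
      simp [pvE]
    rw [hE2]
    rfl
  have hnodup : ((pvE cv gh web so (blog.getD [])).foldl
        (fun d q => d.modify q.2 pvBlank (fun rec => pvSetFlag rec q.1))
        PySem.Dict.empty).keys.Nodup := by
    exact PySem.Dict.nodup_keys_foldl_modify_key _ _ _ _ _ List.nodup_nil
  have hval : ∀ s : String,
      ((pvE cv gh web so (blog.getD [])).foldl
        (fun d q => d.modify q.2 pvBlank (fun rec => pvSetFlag rec q.1))
        PySem.Dict.empty).getD s pvBlank = pvRecA cv gh web so blog s := by
    intro s
    rw [pv_getD_event_fold]
    have hstart : (PySem.Dict.empty : PySem.Dict String (List (String × Bool))).getD s pvBlank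
        = pvBlank := rfl
    rw [hstart, pv_foldl_setFlag]
    have hN : ∀ m : String,
        (((pvE cv gh web so (blog.getD [])).filter (fun q => q.2 == s)).map
          (fun q => q.1)).contains m
        = ((("cv" == m) && cv.contains s) || ((("github" == m) && gh.contains s)
            || ((("web_mentions" == m) && web.contains s)
            || ((("stackoverflow" == m) && so.contains s)
            || (("blog" == m) && (blog.getD []).contains s))))) := by
      intro m
      simp only [pvE, List.flatMap_cons, List.flatMap_nil, List.append_nil,
        List.filter_append, List.map_append, List.contains_append]
      rw [pv_contains_source, pv_contains_source, pv_contains_source, pv_contains_source,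
        pv_contains_source]
    simp only [pvBlank, List.map_cons, List.map_nil, Bool.false_or]
    rw [hN "cv", hN "github", hN "web_mentions", hN "stackoverflow", hN "blog"]
    rw [pv_blog_flag]
    simp [pvRecA]
  rw [pv_A_items, hBfold,
    PySem.Dict.items_eq_map_keys _ hnodup pvBlank, hkeys]
  exact (List.map_congr_left (fun s _ => by rw [hval s])).symm

-- ===== VERDICT (by name: the statement is the Claim_ definition above) =====
theorem merge_skill_sources_spec : Claim_equal_merge_skill_sources := by
  intro cv gh web so blog _
  unfold Spec_merge_skill_sources
  exact merge_skill_sources_eq cv gh web so blog
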